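-- pv_equiv track=rewrite | github.com/SoftGnom/MiscelaneaPassada | IA/src/my_labeling.py | Retrieval_by_Xi
-- ===== SOURCE A (Python) =====
-- def Retrieval_by_Xi(imagenes,etiquetes,busqueda):
--     sortida=[]
--     for vi,ve in zip(imagenes,etiquetes):
--         bol=True
--         l=len(busqueda)
--         i=0
--         while i < l and bol == True:
--
--             if (busqueda[i] in ve and bol==True)==False:
--                 bol=False
--             i+=1
--
--         if bol:
--             sortida.append(vi)
--         #else: -> sortidaNo.append(vi)
--
--     return sortida
-- ===== SOURCE B (Python) =====
-- def Retrieval_by_Xi(imagenes, etiquetes, busqueda):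
--     candidates = list(zip(imagenes, etiquetes))
--     for b in busqueda:
--         candidates = [(vi, ve) for vi, ve in candidates if b in ve]
--     return [vi for vi, ve in candidates]
-- ===== Notes on version B (the rewrite author's own statement) =====
-- stated objective: alternative
-- what changed: Transposes the loop nesting: instead of validating each image against all search terms with a flag-driven while loop, B iterates over the search terms on the outside, successively narrowing a list of (image, labels) candidate pairs by filtering, then projects the surviving images.
import Mathlib
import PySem

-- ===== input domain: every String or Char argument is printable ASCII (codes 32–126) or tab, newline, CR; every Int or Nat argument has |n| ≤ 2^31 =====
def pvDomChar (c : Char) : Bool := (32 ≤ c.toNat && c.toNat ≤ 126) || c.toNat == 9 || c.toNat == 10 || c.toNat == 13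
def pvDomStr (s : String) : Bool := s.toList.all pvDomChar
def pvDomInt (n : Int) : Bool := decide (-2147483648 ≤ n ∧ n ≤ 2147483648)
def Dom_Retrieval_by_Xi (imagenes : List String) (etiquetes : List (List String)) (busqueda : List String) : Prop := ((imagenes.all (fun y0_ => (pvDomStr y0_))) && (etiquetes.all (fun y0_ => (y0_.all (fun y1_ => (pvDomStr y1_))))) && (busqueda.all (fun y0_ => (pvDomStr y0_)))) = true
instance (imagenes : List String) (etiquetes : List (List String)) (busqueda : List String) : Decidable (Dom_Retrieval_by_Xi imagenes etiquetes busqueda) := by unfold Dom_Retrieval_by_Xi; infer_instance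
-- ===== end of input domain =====

-- B transposes A's loop nesting: it filters a candidate (image, labels) list once per
-- search term instead of validating each image against all terms with a flag-driven
-- while loop (objective: alternative decomposition, same cost).

-- ===== PORT A =====
-- A's inner 'while i < l and bol == True' loop, step for step.
-- busqueda[i] is read with pyGet?; inside the loop i < l = busqueda.length, so the
-- read is in range and the `getD ""` default is never used (exact).
def pvAWhile (busqueda : List String) (ve : List String) (l i : Nat) (bol : Bool) : Bool :=
  if _h : i < l ∧ bol = true then
    let bol' := if (((PySem.List.pyGet? busqueda (Int.ofNat i)).getD "" ∈ ve : Bool) && bol) = false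
                then false else bol
    pvAWhile busqueda ve l (i + 1) bol'
  else bol
termination_by l - i
decreasing_by omega

def Retrieval_by_Xi (imagenes : List String) (etiquetes : List (List String)) (busqueda : List String) : List String :=
  (imagenes.zip etiquetes).foldl
    (fun sortida p =>
      let bol := pvAWhile busqueda p.2 busqueda.length 0 true
      if bol then sortida ++ [p.1] else sortida) []

-- ===== PORT B =====
def Retrieval_by_Xi_alt (imagenes : List String) (etiquetes : List (List String)) (busqueda : List String) : List String :=
  let candidates := busqueda.foldl
    (fun cands b => cands.filter (fun p => decide (b ∈ p.2))) (imagenes.zip etiquetes)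
  candidates.map Prod.fst

-- ===== PRECONDITION & SPEC =====
def Spec_Retrieval_by_Xi (imagenes : List String) (etiquetes : List (List String)) (busqueda : List String) (out : List String) : Prop := out = Retrieval_by_Xi_alt imagenes etiquetes busqueda
instance (imagenes : List String) (etiquetes : List (List String)) (busqueda : List String) (out : List String) : Decidable (Spec_Retrieval_by_Xi imagenes etiquetes busqueda out) := by unfold Spec_Retrieval_by_Xi; infer_instance

-- ===== CLAIM (what is proved, stated in full; the proofs are below) =====
def Claim_equal_Retrieval_by_Xi : Prop := ∀ (imagenes : List String) (etiquetes : List (List String)) (busqueda : List String), Dom_Retrieval_by_Xi imagenes etiquetes busqueda → Spec_Retrieval_by_Xi imagenes etiquetes busqueda (Retrieval_by_Xi imagenes etiquetes busqueda)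

-- ===== LEMMAS AND PROOFS =====

-- A's while loop computes: all remaining search terms are in ve (conjoined with the flag).
theorem pvAWhile_eq (busqueda ve : List String) (i : Nat) (bol : Bool) (hi : i ≤ busqueda.length) :
    pvAWhile busqueda ve busqueda.length i bol
      = (bol && (busqueda.drop i).all (fun b => decide (b ∈ ve))) := by
  fun_induction pvAWhile busqueda ve busqueda.length i bol with
  | case1 i bol h bol' ih =>
    obtain ⟨hlt, hb⟩ := h
    subst hb
    have hget : (PySem.List.pyGet? busqueda (Int.ofNat i)).getD "" = busqueda[i]'hlt := by
      simp [PySem.List.pyGet?, PySem.List.pyIdx?, hlt]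
    have hdrop : busqueda.drop i = busqueda[i]'hlt :: busqueda.drop (i + 1) :=
      List.drop_eq_getElem_cons hlt
    rw [ih (by omega), hdrop, List.all_cons]
    by_cases hmem : busqueda[i]'hlt ∈ ve
    · have hb' : bol' = true := by simp only [bol', hget]; simp [hmem]
      rw [hb']; simp [hmem]
    · have hb' : bol' = false := by simp only [bol', hget]; simp [hmem]
      rw [hb']; simp [hmem]
  | case2 i bol h =>
    rcases Bool.eq_false_or_eq_true bol with hb | hb
    case inr => simp [hb]
    · subst hb
      have hi' : i = busqueda.length := by
        rcases Nat.lt_or_ge i busqueda.length with hl | _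
        · exact absurd ⟨hl, rfl⟩ h
        · omega
      subst hi'
      simp

-- B's successive filtering equals one filter by the conjunction of all memberships.
theorem foldl_filter_eq (busqueda : List String) :
    ∀ cands : List (String × List String),
      busqueda.foldl (fun cands b => cands.filter (fun p => decide (b ∈ p.2))) cands
        = cands.filter (fun p => busqueda.all (fun b => decide (b ∈ p.2))) := by
  induction busqueda with
  | nil => intro cands; simp
  | cons b bs ih =>
    intro cands
    simp only [List.foldl_cons, ih, List.filter_filter, List.all_cons]
    exact List.filter_congr (fun p _ => Bool.and_comm ..)

-- ===== VERDICT (by name: the statement is the Claim_ definition above) =====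
theorem Retrieval_by_Xi_spec : Claim_equal_Retrieval_by_Xi := by
  intro imagenes etiquetes busqueda _
  unfold Spec_Retrieval_by_Xi Retrieval_by_Xi Retrieval_by_Xi_alt
  rw [foldl_filter_eq]
  have h : ∀ p : String × List String,
      pvAWhile busqueda p.2 busqueda.length 0 true
        = busqueda.all (fun b => decide (b ∈ p.2)) := by
    intro p
    rw [pvAWhile_eq busqueda p.2 0 true (by omega)]
    simp
  calc (imagenes.zip etiquetes).foldl
        (fun sortida p =>
          let bol := pvAWhile busqueda p.2 busqueda.length 0 true
          if bol then sortida ++ [p.1] else sortida) []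
      = (imagenes.zip etiquetes).foldl
        (fun sortida p =>
          if busqueda.all (fun b => decide (b ∈ p.2)) then sortida ++ [p.1] else sortida) [] := by
        apply PySem.List.foldl_congr_mem
        intro acc p _
        simp only [h p]
    _ = ((imagenes.zip etiquetes).filter (fun p => busqueda.all (fun b => decide (b ∈ p.2)))).map Prod.fst := by
        rw [PySem.List.foldl_append_if]
        simp
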